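-- pv_equiv track=rewrite | github.com/YamaguchiShuhei/conll | lstm_conll.py | _sentence_list
-- ===== SOURCE A (Python) =====
-- def _chunk_change(chunk):
--    chunk_data = [0 for i in range(4)]
--    if chunk == "B":
--       chunk_data[0] = 1
--    elif chunk == "I":
--       chunk_data[1] = 1
--    elif chunk == "O":
--       chunk_data[2] = 1
--    else:
--       chunk_data[3] = 1
--    return chunk_data
--
-- def _sentence_list(word_list, chunk_list, word_to_id):
--    sentence_list = []
--    sent_chunk = []
--    sentence = []
--    chunk = []
--    for i in range(len(word_list)):
--       if word_list[i] != "<eos>":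
--          if word_list[i] in word_to_id:
--             sentence.append([word_to_id[word_list[i]]])
--             chunk.append(_chunk_change(chunk_list[i]))
--          else:
--             sentence.append([len(word_to_id)+1])
--             chunk.append(_chunk_change(chunk_list[i]))
--       else:
--          for k in range(78):
--             if len(sentence) < 78:
--                sentence.append([word_to_id["<eos>"]])
--                chunk.append(_chunk_change("<eos>"))
--             else:
--                break
--          sentence_list.append(sentence)
--          sent_chunk.append(chunk)
--          sentence = []
--          chunk = []
--    return sentence_list, sent_chunk
-- ===== SOURCE B (Python) =====
-- def _chunk_change(chunk):
--    chunk_data = [0 for i in range(4)]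
--    if chunk == "B":
--       chunk_data[0] = 1
--    elif chunk == "I":
--       chunk_data[1] = 1
--    elif chunk == "O":
--       chunk_data[2] = 1
--    else:
--       chunk_data[3] = 1
--    return chunk_data
--
-- def _sentence_list(word_list, chunk_list, word_to_id):
--    # phase 1: cut word_list at each "<eos>" into (word, chunk-tag) segments,
--    # dropping any trailing words not followed by an "<eos>"
--    segments = []
--    cur = []
--    for i, w in enumerate(word_list):
--       if w == "<eos>":
--          segments.append(cur)
--          cur = []
--       else:
--          cur.append((w, chunk_list[i]))
--    # phase 2: build ids / one-hots per segment, then pad short ones to 78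
--    sentence_list = []
--    sent_chunk = []
--    for seg in segments:
--       sentence = [[word_to_id[w]] if w in word_to_id else [len(word_to_id) + 1]
--                   for w, _ in seg]
--       chunk = [_chunk_change(c) for _, c in seg]
--       while len(sentence) < 78:
--          sentence.append([word_to_id["<eos>"]])
--          chunk.append(_chunk_change("<eos>"))
--       sentence_list.append(sentence)
--       sent_chunk.append(chunk)
--    return sentence_list, sent_chunk
-- ===== Notes on version B (the rewrite author's own statement) =====
-- stated objective: alternative
-- what changed: A interleaves everything in one stateful pass (running sentence/chunk buffers flushed and padded at each '<eos>'); B first splits word_list into (word, chunk-tag) segments at each '<eos>' (dropping the trailing unterminated part), then builds the id lists and one-hots per segment with comprehensions and pads short segments with a while loop.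
import Mathlib
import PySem

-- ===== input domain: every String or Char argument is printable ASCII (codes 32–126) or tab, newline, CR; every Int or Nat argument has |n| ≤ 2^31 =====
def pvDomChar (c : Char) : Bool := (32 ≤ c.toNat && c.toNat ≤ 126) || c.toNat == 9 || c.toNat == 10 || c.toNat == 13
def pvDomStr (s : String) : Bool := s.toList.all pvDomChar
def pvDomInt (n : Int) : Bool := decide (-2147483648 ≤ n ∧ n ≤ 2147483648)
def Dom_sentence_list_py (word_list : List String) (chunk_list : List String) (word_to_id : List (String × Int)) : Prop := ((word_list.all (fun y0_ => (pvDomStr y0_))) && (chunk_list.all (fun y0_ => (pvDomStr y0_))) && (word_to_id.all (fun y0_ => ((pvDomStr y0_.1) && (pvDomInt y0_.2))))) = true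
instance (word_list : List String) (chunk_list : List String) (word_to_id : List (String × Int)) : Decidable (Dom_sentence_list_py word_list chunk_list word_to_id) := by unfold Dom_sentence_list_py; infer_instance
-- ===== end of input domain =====

-- B re-decomposes A's single stateful pass into: split into segments first, then build+pad each
-- segment (objective: alternative decomposition; same cost). Equivalence is about the return value.

-- ===== PORT A =====
-- shared helper: Python _chunk_change (one-hot over B/I/O/other)
def chunk_change (chunk : String) : List Int :=
  if chunk = "B" then [1, 0, 0, 0]
  else if chunk = "I" then [0, 1, 0, 0]
  else if chunk = "O" then [0, 0, 1, 0]
  else [0, 0, 0, 1]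

-- dict lookup (first match) and membership on the association list
def dget? (d : List (String × Int)) (w : String) : Option Int :=
  (d.find? (fun p => p.1 == w)).map (·.2)

-- word_to_id[w]; default only reached outside Pre_ (Python: KeyError)
def dgetD (d : List (String × Int)) (w : String) : Int := (dget? d w).getD 0

-- A's inner 'for k in range(78): if len(sentence) < 78: append … else: break'
def padA (word_to_id : List (String × Int)) :
    Nat → List (List Int) → List (List Int) → List (List Int) × List (List Int)
  | 0, s, c => (s, c)
  | k + 1, s, c =>
    if s.length < 78 then
      padA word_to_id k (s ++ [[dgetD word_to_id "<eos>"]]) (c ++ [chunk_change "<eos>"])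
    else (s, c)

-- A's main loop over i in range(len(word_list)), word_list[i] carried as enumerate pairs;
-- chunk_list[i] via pyGetD (default only reached outside Pre_: Python IndexError)
def loopA (chunk_list : List String) (word_to_id : List (String × Int)) :
    List (Int × String) → List (List (List Int)) → List (List (List Int)) →
    List (List Int) → List (List Int) → List (List (List Int)) × List (List (List Int))
  | [], sentence_list, sent_chunk, _, _ => (sentence_list, sent_chunk)
  | (i, w) :: rest, sentence_list, sent_chunk, sentence, chunk =>
    if w ≠ "<eos>" then
      if (dget? word_to_id w).isSome then
        loopA chunk_list word_to_id rest sentence_list sent_chunk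
          (sentence ++ [[dgetD word_to_id w]])
          (chunk ++ [chunk_change (PySem.List.pyGetD chunk_list i "")])
      else
        loopA chunk_list word_to_id rest sentence_list sent_chunk
          (sentence ++ [[(word_to_id.length : Int) + 1]])
          (chunk ++ [chunk_change (PySem.List.pyGetD chunk_list i "")])
    else
      let pc := padA word_to_id 78 sentence chunk
      loopA chunk_list word_to_id rest (sentence_list ++ [pc.1]) (sent_chunk ++ [pc.2]) [] []

def sentence_list_py (word_list : List String) (chunk_list : List String) (word_to_id : List (String × Int)) : List (List (List Int)) × List (List (List Int)) :=
  loopA chunk_list word_to_id (PySem.List.enumerate word_list) [] [] [] []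

-- ===== PORT B =====
-- phase 1: cut at each "<eos>" into segments of (word, chunk-tag) pairs; trailing words dropped
def splitB (chunk_list : List String) :
    List (Int × String) → List (String × String) → List (List (String × String))
  | [], _ => []
  | (i, w) :: rest, cur =>
    if w = "<eos>" then cur :: splitB chunk_list rest []
    else splitB chunk_list rest (cur ++ [(w, PySem.List.pyGetD chunk_list i "")])

-- the two comprehensions of Source B
def buildS (word_to_id : List (String × Int)) (seg : List (String × String)) : List (List Int) :=
  seg.map (fun p =>
    if (dget? word_to_id p.1).isSome then [dgetD word_to_id p.1]
    else [(word_to_id.length : Int) + 1])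

def buildC (seg : List (String × String)) : List (List Int) :=
  seg.map (fun p => chunk_change p.2)

-- Source B's 'while len(sentence) < 78: append …'
def padB (word_to_id : List (String × Int)) (s c : List (List Int)) :
    List (List Int) × List (List Int) :=
  if s.length < 78 then
    padB word_to_id (s ++ [[dgetD word_to_id "<eos>"]]) (c ++ [chunk_change "<eos>"])
  else (s, c)
termination_by 78 - s.length
decreasing_by simp; omega

def sentence_list_py_alt (word_list : List String) (chunk_list : List String) (word_to_id : List (String × Int)) : List (List (List Int)) × List (List (List Int)) :=
  (splitB chunk_list (PySem.List.enumerate word_list) []).foldl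
    (fun acc seg =>
      let sc := padB word_to_id (buildS word_to_id seg) (buildC seg)
      (acc.1 ++ [sc.1], acc.2 ++ [sc.2]))
    ([], [])

-- ===== PRECONDITION & SPEC =====
-- Pre_ is exact: Python A raises IndexError when a non-"<eos>" word has no chunk tag, and
-- KeyError when padding fires (an "<eos>" whose segment — the 78 preceding positions are not
-- all non-eos — is shorter than 78) while "<eos>" is not a key of word_to_id.
def Pre_sentence_list_py (word_list : List String) (chunk_list : List String) (word_to_id : List (String × Int)) : Prop :=
  ∀ i : Nat, i < word_list.length →
    ((word_list[i]? ≠ some "<eos>" → i < chunk_list.length) ∧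
     (word_list[i]? = some "<eos>" →
       ((dget? word_to_id "<eos>").isSome ∨
        (78 ≤ i ∧ ∀ j : Nat, j < i → i ≤ j + 78 → word_list[j]? ≠ some "<eos>"))))
instance (word_list : List String) (chunk_list : List String) (word_to_id : List (String × Int)) : Decidable (Pre_sentence_list_py word_list chunk_list word_to_id) := by unfold Pre_sentence_list_py; infer_instance

def pvWitness_sentence_list_py : List String × List String × (List (String × Int)) :=
  (["a", "<eos>", "b", "b", "<eos>"], ["B", "I", "O", "X", "B"], [("<eos>", 0), ("a", 5)])

def Spec_sentence_list_py (word_list : List String) (chunk_list : List String) (word_to_id : List (String × Int)) (out : List (List (List Int)) × List (List (List Int))) : Prop := out = sentence_list_py_alt word_list chunk_list word_to_id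
instance (word_list : List String) (chunk_list : List String) (word_to_id : List (String × Int)) (out : List (List (List Int)) × List (List (List Int))) : Decidable (Spec_sentence_list_py word_list chunk_list word_to_id out) := by unfold Spec_sentence_list_py; infer_instance

-- ===== CLAIM (what is proved, stated in full; the proofs are below) =====
def Claim_equal_sentence_list_py : Prop := ∀ (word_list : List String) (chunk_list : List String) (word_to_id : List (String × Int)), Dom_sentence_list_py word_list chunk_list word_to_id → Pre_sentence_list_py word_list chunk_list word_to_id → Spec_sentence_list_py word_list chunk_list word_to_id (sentence_list_py word_list chunk_list word_to_id)

-- ===== LEMMAS AND PROOFS =====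

-- A's bounded pad loop (fuel 78) equals B's while loop whenever the fuel suffices
theorem padA_eq_padB (wid : List (String × Int)) :
    ∀ (k : Nat) (s c : List (List Int)), 78 - s.length ≤ k →
      padA wid k s c = padB wid s c := by
  intro k
  induction k with
  | zero =>
    intro s c h
    rw [padB]
    rw [if_neg (by omega)]
    rfl
  | succ k ih =>
    intro s c h
    by_cases hs : s.length < 78
    · rw [padA, if_pos hs, padB, if_pos hs]
      exact ih _ _ (by simp; omega)
    · rw [padA, if_neg hs, padB, if_neg hs]

-- the invariant: A's running (sentence, chunk) state is B's current segment, mapped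
theorem loopA_eq (cl : List String) (wid : List (String × Int)) :
    ∀ (l : List (Int × String)) (cur : List (String × String))
      (SL SC : List (List (List Int))),
      loopA cl wid l SL SC (buildS wid cur) (buildC cur)
        = (splitB cl l cur).foldl
            (fun acc seg =>
              let sc := padB wid (buildS wid seg) (buildC seg)
              (acc.1 ++ [sc.1], acc.2 ++ [sc.2]))
            (SL, SC) := by
  intro l
  induction l with
  | nil => intro cur SL SC; simp [loopA, splitB]
  | cons p rest ih =>
    obtain ⟨i, w⟩ := p
    intro cur SL SC
    by_cases hw : w = "<eos>"
    · subst hw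
      rw [loopA, if_neg (by simp), splitB, if_pos rfl]
      have hpad := padA_eq_padB wid 78 (buildS wid cur) (buildC cur) (by omega)
      simp only [hpad, List.foldl_cons]
      have := ih [] (SL ++ [(padB wid (buildS wid cur) (buildC cur)).1])
                     (SC ++ [(padB wid (buildS wid cur) (buildC cur)).2])
      simpa [buildS, buildC] using this
    · rw [loopA, if_pos (by simpa using hw), splitB, if_neg hw]
      by_cases hm : (dget? wid w).isSome
      · rw [if_pos hm]
        have := ih (cur ++ [(w, PySem.List.pyGetD cl i "")]) SL SC
        simpa [buildS, buildC, hm] using this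
      · rw [if_neg hm]
        have := ih (cur ++ [(w, PySem.List.pyGetD cl i "")]) SL SC
        simpa [buildS, buildC, hm] using this

-- ===== VERDICT (by name: the statement is the Claim_ definition above) =====
theorem sentence_list_py_spec : Claim_equal_sentence_list_py := by
  intro word_list chunk_list word_to_id _dom _pre
  unfold Spec_sentence_list_py sentence_list_py sentence_list_py_alt
  have := loopA_eq chunk_list word_to_id (PySem.List.enumerate word_list) [] [] []
  simpa [buildS, buildC] using this
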